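-- pv_equiv track=rewrite | github.com/jpaullopes/questoes-bee | python/n3_1239.py | text_converssor_html
-- ===== SOURCE A (Python) =====
-- def text_converssor_html(text):
--     new_text = ''
--     count_intalic = 0
--     count_bolder = 0
--     for c in text:
--         if c == '_':
--             if count_intalic == 0:
--                 new_text += '<i>'
--                 count_intalic += 1
--             else:
--                 new_text += '</i>'
--                 count_intalic = 0
--         elif c == '*':
--             if count_bolder == 0:
--                 new_text += '<b>'
--                 count_bolder += 1
--             else:
--                 new_text += '</b>'
--                 count_bolder = 0
--         else:
--             new_text += c
--
--     return new_text
-- ===== SOURCE B (Python) =====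
-- def _alt_pass(text, marker, opening, closing):
--     out = []
--     open_next = True
--     for c in text:
--         if c == marker:
--             out.append(opening if open_next else closing)
--             open_next = not open_next
--         else:
--             out.append(c)
--     return ''.join(out)
--
--
-- def text_converssor_html(text):
--     return _alt_pass(_alt_pass(text, '_', '<i>', '</i>'), '*', '<b>', '</b>')
-- ===== Notes on version B (the rewrite author's own statement) =====
-- stated objective: alternative
-- what changed: Replaces A's single interleaved two-counter state machine with a generic one-marker alternating-replacement helper applied in two independent passes ('_' then '*'); equal because the injected italic tags contain no '*'.
import Mathlib
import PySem

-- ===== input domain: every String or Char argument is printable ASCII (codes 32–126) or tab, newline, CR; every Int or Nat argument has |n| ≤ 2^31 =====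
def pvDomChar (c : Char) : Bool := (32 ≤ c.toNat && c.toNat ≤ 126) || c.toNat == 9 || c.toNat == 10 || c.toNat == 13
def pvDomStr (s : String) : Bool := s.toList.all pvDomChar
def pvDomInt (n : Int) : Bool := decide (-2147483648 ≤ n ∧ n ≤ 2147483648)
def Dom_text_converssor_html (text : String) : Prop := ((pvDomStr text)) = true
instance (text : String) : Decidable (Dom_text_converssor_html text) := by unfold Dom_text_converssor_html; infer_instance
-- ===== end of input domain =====

-- B replaces A's interleaved two-counter state machine by a generic one-marker alternating
-- replacement pass applied twice ('_' first, then '*'); alternative decomposition, same cost.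


-- ===== PORT A =====
def text_converssor_html (text : String) : String :=
  (text.toList.foldl (fun (st : String × Int × Int) c =>
    let (new_text, ci, cb) := st
    if c = '_' then
      if ci = 0 then (new_text ++ "<i>", ci + 1, cb) else (new_text ++ "</i>", 0, cb)
    else if c = '*' then
      if cb = 0 then (new_text ++ "<b>", ci, cb + 1) else (new_text ++ "</b>", ci, 0)
    else (new_text ++ String.ofList [c], ci, cb)) ("", 0, 0)).1

-- ===== PORT B =====
def pvAltPass (text : String) (marker : Char) (opening closing : String) : String :=
  PySem.Str.join ""
    ((text.toList.foldl (fun (st : List String × Bool) c =>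
      if c = marker then (st.1 ++ [if st.2 then opening else closing], !st.2)
      else (st.1 ++ [String.ofList [c]], st.2)) ([], true)).1)

def text_converssor_html_alt (text : String) : String :=
  pvAltPass (pvAltPass text '_' "<i>" "</i>") '*' "<b>" "</b>"

-- ===== PRECONDITION & SPEC =====
def Spec_text_converssor_html (text : String) (out : String) : Prop := out = text_converssor_html_alt text
instance (text : String) (out : String) : Decidable (Spec_text_converssor_html text out) := by unfold Spec_text_converssor_html; infer_instance

-- ===== CLAIM (what is proved, stated in full; the proofs are below) =====
def Claim_equal_text_converssor_html : Prop := ∀ (text : String), Dom_text_converssor_html text → Spec_text_converssor_html text (text_converssor_html text)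

-- ===== LEMMAS AND PROOFS =====

-- recursive model of one alternating-replacement pass (B's helper), over char lists
def rP (m : Char) (o cl : List Char) : List Char → Bool → List Char
  | [], _ => []
  | x :: xs, f =>
    if x = m then (if f then o else cl) ++ rP m o cl xs (!f)
    else x :: rP m o cl xs f

-- recursive model of A's loop; the Bool flags are `count == 0`
def rA : List Char → Bool → Bool → List Char
  | [], _, _ => []
  | x :: xs, i, b =>
    if x = '_' then (if i then ['<','i','>'] else ['<','/','i','>']) ++ rA xs (!i) b
    else if x = '*' then (if b then ['<','b','>'] else ['<','/','b','>']) ++ rA xs i (!b)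
    else x :: rA xs i b

theorem joinNil_eq_flatten (L : List (List Char)) :
    PySem.Chars.join [] L = L.flatten := by
  induction L with
  | nil => rfl
  | cons a L ih =>
    cases L with
    | nil => simp [PySem.Chars.join, List.intercalate]
    | cons b M =>
      simp only [PySem.Chars.join] at *
      rw [List.intercalate] at *
      simp_all [List.intersperse]

-- A's foldl computes rA (flags record whether the counters are zero)
theorem foldA_toList (cs : List Char) (s : String) (ci cb : Int) :
    ((cs.foldl (fun (st : String × Int × Int) c =>
      let (new_text, ci, cb) := st
      if c = '_' then
        if ci = 0 then (new_text ++ "<i>", ci + 1, cb) else (new_text ++ "</i>", 0, cb)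
      else if c = '*' then
        if cb = 0 then (new_text ++ "<b>", ci, cb + 1) else (new_text ++ "</b>", ci, 0)
      else (new_text ++ String.ofList [c], ci, cb)) (s, ci, cb)).1).toList
      = s.toList ++ rA cs (decide (ci = 0)) (decide (cb = 0)) := by
  induction cs generalizing s ci cb with
  | nil => simp [rA]
  | cons c cs ih =>
    by_cases h1 : c = '_'
    · subst h1
      by_cases h2 : ci = 0
      · subst h2
        simp [rA, List.foldl_cons, ih, String.toList_append]
      · simp [rA, List.foldl_cons, ih, String.toList_append, h2]
    · by_cases h2 : c = '*'
      · subst h2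
        by_cases h3 : cb = 0
        · subst h3
          simp [rA, List.foldl_cons, ih, String.toList_append, h1]
        · simp [rA, List.foldl_cons, ih, String.toList_append, h1, h3]
      · simp [rA, List.foldl_cons, ih, String.toList_append, h1, h2]

-- B's one-pass foldl computes rP
theorem foldB_flatten (m : Char) (o cl : String) (cs : List Char) (L : List String) (f : Bool) :
    (((cs.foldl (fun (st : List String × Bool) c =>
      if c = m then (st.1 ++ [if st.2 then o else cl], !st.2)
      else (st.1 ++ [String.ofList [c]], st.2)) (L, f)).1).map String.toList).flatten
      = (L.map String.toList).flatten ++ rP m o.toList cl.toList cs f := by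
  induction cs generalizing L f with
  | nil => simp [rP]
  | cons c cs ih =>
    by_cases h : c = m
    · subst h
      cases f <;> simp [rP, List.foldl_cons, ih]
    · simp [rP, List.foldl_cons, ih, h]

theorem pvAltPass_toList (text : String) (m : Char) (o cl : String) :
    (pvAltPass text m o cl).toList = rP m o.toList cl.toList text.toList true := by
  unfold pvAltPass
  rw [show ∀ L : List String, (PySem.Str.join "" L).toList
        = PySem.Chars.join [] (L.map String.toList) from fun L => by simp [pysem]]
  rw [joinNil_eq_flatten, foldB_flatten]
  simp

-- core: the '*'-pass after the '_'-pass equals A's interleaved machine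
theorem core (cs : List Char) (i b : Bool) :
    rP '*' ['<','b','>'] ['<','/','b','>']
      (rP '_' ['<','i','>'] ['<','/','i','>'] cs i) b = rA cs i b := by
  induction cs generalizing i b with
  | nil => simp [rP, rA]
  | cons c cs ih =>
    by_cases h1 : c = '_'
    · subst h1
      cases i <;> simp [rP, rA, ih]
    · by_cases h2 : c = '*'
      · subst h2
        cases b <;> simp [rP, rA, h1, ih]
      · simp [rP, rA, h1, h2, ih]

-- ===== VERDICT (by name: the statement is the Claim_ definition above) =====
theorem text_converssor_html_spec : Claim_equal_text_converssor_html := by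
  intro text _
  unfold Spec_text_converssor_html text_converssor_html text_converssor_html_alt
  apply String.toList_inj.mp
  rw [foldA_toList, pvAltPass_toList, pvAltPass_toList]
  simpa using (core text.toList true true).symm
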